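-- pv_equiv track=rewrite | github.com/olivernormand/project-euler | 012_2.py | returntrianglefactors
-- ===== SOURCE A (Python) =====
-- def returnfactorslist(factorise):
--     i = 1
--     factors = []
--     while i <= factorise:
--         if factorise % i == 0:
--             factors.append(i)
--             i += 1
--         if factorise % i != 0:
--             i += 1
--     return factors
--     pass
--
-- def returntrianglefactors(n): # Implicitly reduces the number of factors, since factors each can multiply
--     factors1 = returnfactorslist(n)
--     factors2 = returnfactorslist(n + 1)
--     factors = factors1 + factors2
--     factors.remove(2)
--     finalfactors = []
--     for num in factors:
--         if num not in finalfactors: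
--             finalfactors.append(num)
--     finalfactors.sort()
--     return finalfactors
-- ===== SOURCE B (Python) =====
-- def _divisors(m):
--     ds = set()
--     i = 1
--     while i * i <= m:
--         if m % i == 0:
--             ds.add(i)
--             ds.add(m // i)
--         i += 1
--     return ds
--
-- def returntrianglefactors(n):
--     s = _divisors(n) | _divisors(n + 1)
--     s.discard(2)
--     return sorted(s)
-- ===== Notes on version B (the rewrite author's own statement) =====
-- stated objective: faster
-- what changed: Replaces the O(n) divisor scans (1..n and 1..n+1) and the list remove/dedup/sort pipeline with trial division up to sqrt(n) adding both d and m//d into a set, then union, discard 2, sorted.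
-- outside the precondition, e.g. on returntrianglefactors(0): A raises ValueError, B returns [1]
import Mathlib
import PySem

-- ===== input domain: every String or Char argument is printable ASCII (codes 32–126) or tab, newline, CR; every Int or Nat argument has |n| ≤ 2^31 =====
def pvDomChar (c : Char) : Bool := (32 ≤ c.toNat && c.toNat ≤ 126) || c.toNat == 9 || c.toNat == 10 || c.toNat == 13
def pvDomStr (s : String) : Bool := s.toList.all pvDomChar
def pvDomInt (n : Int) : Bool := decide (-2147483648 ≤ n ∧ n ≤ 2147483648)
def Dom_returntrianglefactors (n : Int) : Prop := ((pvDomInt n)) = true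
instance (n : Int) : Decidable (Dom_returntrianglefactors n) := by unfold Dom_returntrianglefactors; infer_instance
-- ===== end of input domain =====

-- B replaces A's O(n) divisor scans with trial division up to √n collecting {d, m//d} into
-- a set, then union / discard 2 / sorted (objective: faster).

-- ===== PORT A =====
-- while i <= factorise: if % == 0: append, i += 1; if % != 0: i += 1
-- (fuel is a totality device only; fuel = factorise.toNat never runs out, i advances each step)
def returnfactorslistAux (fuel : Nat) (factorise : Int) (i : Int) (factors : List Int) : List Int :=
  match fuel with
  | 0 => factors
  | fuel + 1 =>
    if i ≤ factorise then
      if PySem.Int.mod factorise i = 0 then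
        -- appended i, i += 1; then the second 'if' looks at the NEW i
        if PySem.Int.mod factorise (i + 1) ≠ 0 then
          returnfactorslistAux fuel factorise (i + 2) (factors ++ [i])
        else
          returnfactorslistAux fuel factorise (i + 1) (factors ++ [i])
      else
        -- first 'if' false, so the second 'if' (same i, % != 0) fires
        returnfactorslistAux fuel factorise (i + 1) factors
    else factors

def returnfactorslist (factorise : Int) : List Int :=
  returnfactorslistAux factorise.toNat factorise 1 []

def returntrianglefactors (n : Int) : List Int :=
  let factors1 := returnfactorslist n
  let factors2 := returnfactorslist (n + 1)
  let factors0 := factors1 ++ factors2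
  match PySem.List.remove? factors0 2 with
  | none => []  -- factors.remove(2) raises ValueError here; excluded by Pre_
  | some factors =>
    let finalfactors :=
      factors.foldl (fun acc num => if num ∈ acc then acc else acc ++ [num]) []
    PySem.List.sorted finalfactors (fun x => x) false

-- ===== PORT B =====
-- while i*i <= m: if m % i == 0: ds.add(i); ds.add(m//i); i += 1   (fuel: totality device only)
def divisorsAux (fuel : Nat) (m : Int) (i : Int) (ds : PySem.Set Int) : PySem.Set Int :=
  match fuel with
  | 0 => ds
  | fuel + 1 =>
    if i * i ≤ m then
      divisorsAux fuel m (i + 1)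
        (if PySem.Int.mod m i = 0 then
          PySem.Set.add (PySem.Set.add ds i) (PySem.Int.floordiv m i)
        else ds)
    else ds

def divisorsSet (m : Int) : PySem.Set Int :=
  divisorsAux m.toNat m 1 PySem.Set.empty

def returntrianglefactors_alt (n : Int) : List Int :=
  let s := PySem.Set.union (divisorsSet n) (divisorsSet (n + 1))
  let s' := PySem.Set.discard s 2
  PySem.List.sorted s' (fun x => x) false

-- ===== PRECONDITION & SPEC =====
-- For n ≤ 0 neither divisor list contains 2, so A's factors.remove(2) raises ValueError; B returns the sorted divisor set without 2 there.
def Pre_returntrianglefactors (n : Int) : Prop := 1 ≤ n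
instance (n : Int) : Decidable (Pre_returntrianglefactors n) := by
  unfold Pre_returntrianglefactors; infer_instance
def pvWitness_returntrianglefactors : Int := 6

def Spec_returntrianglefactors (n : Int) (out : List Int) : Prop :=
  out = returntrianglefactors_alt n
instance (n : Int) (out : List Int) : Decidable (Spec_returntrianglefactors n out) := by
  unfold Spec_returntrianglefactors; infer_instance

-- ===== CLAIM (what is proved, stated in full; the proofs are below) =====
def Claim_equal_returntrianglefactors : Prop :=
  ∀ (n : Int), Dom_returntrianglefactors n → Pre_returntrianglefactors n →
    Spec_returntrianglefactors n (returntrianglefactors n)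

-- ===== LEMMAS AND PROOFS =====

theorem pvLeMulSelf (i : Int) : i ≤ i * i := by
  rcases le_total i 0 with h | h
  · nlinarith
  · nlinarith

-- the divisors of m lying in [lo, m], ascending
def pvDivsFrom (m lo : Int) : List Int :=
  (PySem.List.pyRange lo (m + 1) 1).filter (fun x => decide (PySem.Int.mod m x = 0))

-- A's inner loop is the ascending divisibility filter of [i, factorise].
theorem returnfactorslistAux_eq (fuel : Nat) :
    ∀ (m i : Int) (factors : List Int), (m + 1 - i).toNat ≤ fuel →
    returnfactorslistAux fuel m i factors = factors ++ pvDivsFrom m i := by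
  induction fuel with
  | zero =>
    intro m i factors h
    have : m + 1 ≤ i := by omega
    simp [returnfactorslistAux, pvDivsFrom, PySem.List.pyRange_one_eq_nil this]
  | succ fuel ih =>
    intro m i factors h
    by_cases hi : i ≤ m
    · have hcons : PySem.List.pyRange i (m + 1) 1 = i :: PySem.List.pyRange (i + 1) (m + 1) 1 :=
        PySem.List.pyRange_one_cons (by omega)
      by_cases h1 : PySem.Int.mod m i = 0
      · by_cases h2 : PySem.Int.mod m (i + 1) ≠ 0
        · have htail : pvDivsFrom m (i + 1) = pvDivsFrom m (i + 2) := by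
            by_cases hi1 : i + 1 ≤ m
            · unfold pvDivsFrom
              rw [PySem.List.pyRange_one_cons (show (i + 1 : Int) < m + 1 by omega),
                List.filter_cons, if_neg (by simp [h2]),
                show (i : Int) + 1 + 1 = i + 2 by ring]
            · have e1 : PySem.List.pyRange (i + 1) (m + 1) 1 = [] :=
                PySem.List.pyRange_one_eq_nil (by omega)
              have e2 : PySem.List.pyRange (i + 2) (m + 1) 1 = [] :=
                PySem.List.pyRange_one_eq_nil (by omega)
              simp [pvDivsFrom, e1, e2]
          rw [returnfactorslistAux]
          simp only [if_pos hi, if_pos h1, if_pos h2]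
          rw [ih m (i + 2) (factors ++ [i]) (by omega), ← htail]
          simp [pvDivsFrom, hcons, h1]
        · rw [returnfactorslistAux]
          simp only [if_pos hi, if_pos h1, if_neg h2]
          rw [ih m (i + 1) (factors ++ [i]) (by omega)]
          simp [pvDivsFrom, hcons, h1]
      · rw [returnfactorslistAux]
        simp only [if_pos hi, if_neg h1]
        rw [ih m (i + 1) factors (by omega)]
        simp [pvDivsFrom, hcons, h1]
    · have : PySem.List.pyRange i (m + 1) 1 = [] :=
        PySem.List.pyRange_one_eq_nil (by omega)
      rw [returnfactorslistAux]
      simp [hi, pvDivsFrom, this]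

theorem returnfactorslist_eq (m : Int) : returnfactorslist m = pvDivsFrom m 1 := by
  have := returnfactorslistAux_eq m.toNat m 1 [] (by omega)
  simpa [returnfactorslist] using this

theorem mem_pvDivsFrom (m x : Int) :
    x ∈ pvDivsFrom m 1 ↔ 1 ≤ x ∧ x ≤ m ∧ PySem.Int.mod m x = 0 := by
  simp [pvDivsFrom, List.mem_filter, PySem.List.mem_pyRange_one]
  omega

theorem pairwise_pvDivsFrom (m : Int) : (pvDivsFrom m 1).Pairwise (· < ·) :=
  (PySem.List.pairwise_lt_pyRange_one 1 (m + 1)).filter _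

theorem nodup_pvDivsFrom (m : Int) : (pvDivsFrom m 1).Nodup :=
  (pairwise_pvDivsFrom m).imp (fun h => ne_of_lt h)

-- B's loop: membership in the accumulated set
theorem mem_divisorsAux (fuel : Nat) :
    ∀ (m i : Int) (ds : PySem.Set Int) (x : Int), 1 ≤ i → (m + 1 - i).toNat ≤ fuel →
    (x ∈ divisorsAux fuel m i ds ↔
      x ∈ ds ∨ ∃ d, i ≤ d ∧ d * d ≤ m ∧ PySem.Int.mod m d = 0 ∧
        (x = d ∨ x = PySem.Int.floordiv m d)) := by
  induction fuel with
  | zero =>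
    intro m i ds x hi h
    simp only [divisorsAux]
    constructor
    · intro hx; exact Or.inl hx
    · rintro (hx | ⟨d, hd, hdd, -, -⟩)
      · exact hx
      · exfalso; have := pvLeMulSelf d; omega
  | succ fuel ih =>
    intro m i ds x hi h
    rw [divisorsAux]
    by_cases hii : i * i ≤ m
    · rw [if_pos hii]
      rw [ih m (i + 1) _ x (by omega) (by omega)]
      constructor
      · rintro (hds | ⟨d, hd, hdd, hmod, hx⟩)
        · by_cases h1 : PySem.Int.mod m i = 0
          · rw [if_pos h1] at hds
            simp only [PySem.Set.mem_add] at hds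
            rcases hds with (hds'' | hx) | hx
            · exact Or.inl hds''
            · exact Or.inr ⟨i, le_refl i, hii, h1, Or.inl hx⟩
            · exact Or.inr ⟨i, le_refl i, hii, h1, Or.inr hx⟩
          · rw [if_neg h1] at hds
            exact Or.inl hds
        · exact Or.inr ⟨d, by omega, hdd, hmod, hx⟩
      · rintro (hds | ⟨d, hd, hdd, hmod, hx⟩)
        · left
          by_cases h1 : PySem.Int.mod m i = 0
          · rw [if_pos h1]
            simp only [PySem.Set.mem_add]
            exact Or.inl (Or.inl hds)
          · rw [if_neg h1]; exact hds
        · by_cases hdi : d = i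
          · subst hdi
            left
            rw [if_pos hmod]
            simp only [PySem.Set.mem_add]
            rcases hx with hx | hx
            · exact Or.inl (Or.inr hx)
            · exact Or.inr hx
          · exact Or.inr ⟨d, by omega, hdd, hmod, hx⟩
    · rw [if_neg hii]
      constructor
      · intro hx; exact Or.inl hx
      · rintro (hx | ⟨d, hd, hdd, -, -⟩)
        · exact hx
        · exfalso
          have : i * i ≤ d * d := by nlinarith
          omega

theorem nodup_divisorsAux (fuel : Nat) :
    ∀ (m i : Int) (ds : PySem.Set Int), ds.Nodup → (divisorsAux fuel m i ds).Nodup := by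
  induction fuel with
  | zero => intro m i ds h; simpa [divisorsAux] using h
  | succ fuel ih =>
    intro m i ds h
    rw [divisorsAux]
    by_cases hii : i * i ≤ m
    · rw [if_pos hii]
      apply ih
      by_cases h1 : PySem.Int.mod m i = 0
      · rw [if_pos h1]
        exact PySem.Set.nodup_add _ _ (PySem.Set.nodup_add _ _ h)
      · rw [if_neg h1]; exact h
    · rw [if_neg hii]; exact h

theorem nodup_divisorsSet (m : Int) : (divisorsSet m).Nodup :=
  nodup_divisorsAux m.toNat m 1 PySem.Set.empty List.nodup_nil

-- the key number-theoretic fact: the √m trial division finds exactly the divisors in [1, m]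
theorem divisor_char (m x : Int) (hm : 1 ≤ m) :
    (∃ d, 1 ≤ d ∧ d * d ≤ m ∧ PySem.Int.mod m d = 0 ∧
      (x = d ∨ x = PySem.Int.floordiv m d)) ↔
    (1 ≤ x ∧ x ≤ m ∧ PySem.Int.mod m x = 0) := by
  constructor
  · rintro ⟨d, hd1, hdd, hmod, hx⟩
    have hdvd : d ∣ m := (PySem.Int.mod_eq_zero_iff_dvd m d).1 hmod
    obtain ⟨q, hq⟩ := hdvd
    have hq1 : 1 ≤ q := by nlinarith
    have hfd : PySem.Int.floordiv m d = q := by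
      rw [PySem.Int.floordiv_eq_ediv_of_pos (by omega), hq,
        Int.mul_ediv_cancel_left q (by omega)]
    rcases hx with hx | hx
    · subst hx
      refine ⟨hd1, le_trans (pvLeMulSelf x) hdd, hmod⟩
    · rw [hfd] at hx; subst hx
      refine ⟨hq1, by nlinarith, ?_⟩
      rw [PySem.Int.mod_eq_zero_iff_dvd]
      exact ⟨d, by rw [hq]; ring⟩
  · rintro ⟨hx1, hxm, hmod⟩
    have hdvd : x ∣ m := (PySem.Int.mod_eq_zero_iff_dvd m x).1 hmod
    obtain ⟨q, hq⟩ := hdvd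
    have hq1 : 1 ≤ q := by nlinarith
    by_cases hxx : x * x ≤ m
    · exact ⟨x, hx1, hxx, hmod, Or.inl rfl⟩
    · refine ⟨q, hq1, ?_, ?_, Or.inr ?_⟩
      · have hqx : q < x := by nlinarith
        nlinarith
      · rw [PySem.Int.mod_eq_zero_iff_dvd]
        exact ⟨x, by rw [hq]; ring⟩
      · rw [PySem.Int.floordiv_eq_ediv_of_pos (by omega), hq, mul_comm,
          Int.mul_ediv_cancel_left x (by omega)]

theorem mem_divisorsSet (m x : Int) (hm : 1 ≤ m) :
    x ∈ divisorsSet m ↔ 1 ≤ x ∧ x ≤ m ∧ PySem.Int.mod m x = 0 := by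
  rw [divisorsSet, mem_divisorsAux m.toNat m 1 PySem.Set.empty x (by omega) (by omega)]
  rw [← divisor_char m x hm]
  simp [PySem.Set.empty]

-- A's dedup loop
theorem mem_dedupFold (l : List Int) :
    ∀ (acc : List Int) (x : Int),
    (x ∈ l.foldl (fun acc num => if num ∈ acc then acc else acc ++ [num]) acc ↔
      x ∈ acc ∨ x ∈ l) := by
  induction l with
  | nil => intro acc x; simp
  | cons num l ih =>
    intro acc x
    simp only [List.foldl_cons]
    by_cases h : num ∈ acc
    · rw [if_pos h, ih]
      constructor
      · rintro (hx | hx)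
        · exact Or.inl hx
        · exact Or.inr (List.mem_cons_of_mem _ hx)
      · rintro (hx | hx)
        · exact Or.inl hx
        · rcases List.mem_cons.1 hx with rfl | hx
          · exact Or.inl h
          · exact Or.inr hx
    · rw [if_neg h, ih]
      simp [List.mem_append, List.mem_cons]
      tauto
  
theorem nodup_dedupFold (l : List Int) :
    ∀ (acc : List Int), acc.Nodup →
    (l.foldl (fun acc num => if num ∈ acc then acc else acc ++ [num]) acc).Nodup := by
  induction l with
  | nil => intro acc h; simpa
  | cons num l ih =>
    intro acc h
    simp only [List.foldl_cons]
    by_cases hm : num ∈ acc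
    · rw [if_pos hm]; exact ih acc h
    · rw [if_neg hm]
      apply ih
      rw [List.nodup_append]
      refine ⟨h, List.nodup_singleton _, ?_⟩
      intro a ha e he eq
      rcases List.mem_singleton.mp he with rfl
      exact hm (eq ▸ ha)

-- the concatenated list of A contains 2 exactly once (n ≥ 1: exactly one of n, n+1 is an even number ≥ 2)
theorem two_mem_concat (n : Int) (hn : 1 ≤ n) :
    2 ∈ pvDivsFrom n 1 ++ pvDivsFrom (n + 1) 1 := by
  rcases Int.even_or_odd n with ⟨k, hk⟩ | ⟨k, hk⟩
  · apply List.mem_append_left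
    rw [mem_pvDivsFrom]
    refine ⟨by omega, by omega, ?_⟩
    rw [PySem.Int.mod_eq_zero_iff_dvd]
    exact ⟨k, by omega⟩
  · apply List.mem_append_right
    rw [mem_pvDivsFrom]
    refine ⟨by omega, by omega, ?_⟩
    rw [PySem.Int.mod_eq_zero_iff_dvd]
    exact ⟨k + 1, by omega⟩

theorem count_two_concat (n : Int) :
    (pvDivsFrom n 1 ++ pvDivsFrom (n + 1) 1).count 2 ≤ 1 := by
  rw [List.count_append]
  have h1 := List.nodup_iff_count_le_one.1 (nodup_pvDivsFrom n) 2
  have h2 := List.nodup_iff_count_le_one.1 (nodup_pvDivsFrom (n + 1)) 2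
  -- 2 cannot divide both n and n+1
  by_cases hd : 2 ∈ pvDivsFrom n 1
  · have hc2 : 2 ∉ pvDivsFrom (n + 1) 1 := by
      rw [mem_pvDivsFrom] at hd ⊢
      rw [PySem.Int.mod_eq_zero_iff_dvd] at hd
      obtain ⟨-, -, ⟨a, ha⟩⟩ := hd
      rintro ⟨-, -, hb⟩
      rw [PySem.Int.mod_eq_zero_iff_dvd] at hb
      obtain ⟨b, hb⟩ := hb
      omega
    rw [List.count_eq_zero_of_not_mem hc2]
    omega
  · rw [List.count_eq_zero_of_not_mem hd]
    omega

theorem mem_erase_two (n x : Int) (hn : 1 ≤ n) :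
    (x ∈ (pvDivsFrom n 1 ++ pvDivsFrom (n + 1) 1).erase 2 ↔
      x ∈ pvDivsFrom n 1 ++ pvDivsFrom (n + 1) 1 ∧ x ≠ 2) := by
  set l := pvDivsFrom n 1 ++ pvDivsFrom (n + 1) 1 with hl
  by_cases hx : x = 2
  · subst hx
    have hcount : l.count 2 = 1 :=
      le_antisymm (count_two_concat n) (List.one_le_count_iff.2 (two_mem_concat n hn))
    have : (l.erase 2).count 2 = 0 := by
      rw [List.count_erase_self, hcount]
    simp [List.count_eq_zero.1 this]
  · rw [List.mem_erase_of_ne hx]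
    simp [hx]

-- ===== VERDICT (by name: the statement is the Claim_ definition above) =====
theorem returntrianglefactors_spec : Claim_equal_returntrianglefactors := by
  intro n hdom hn
  unfold Pre_returntrianglefactors at hn
  unfold Spec_returntrianglefactors
  -- unfold A down to sorted finalfactors
  have h2 : 2 ∈ returnfactorslist n ++ returnfactorslist (n + 1) := by
    rw [returnfactorslist_eq, returnfactorslist_eq]; exact two_mem_concat n hn
  have hrem := PySem.List.remove?_eq_some_erase _ _ h2
  rw [returntrianglefactors]
  simp only [hrem]
  -- both sides are sorted id of Nodup lists with the same members
  set FF := ((returnfactorslist n ++ returnfactorslist (n + 1)).erase 2).foldl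
    (fun acc num => if num ∈ acc then acc else acc ++ [num]) [] with hFF
  set S := PySem.Set.discard
    (PySem.Set.union (divisorsSet n) (divisorsSet (n + 1))) 2 with hS
  have hFFnodup : FF.Nodup := nodup_dedupFold _ [] List.nodup_nil
  have hSnodup : S.Nodup :=
    PySem.Set.nodup_discard _ _ (PySem.Set.nodup_union _ _ (nodup_divisorsSet n))
  have hmem : ∀ x, x ∈ FF ↔ x ∈ S := by
    intro x
    rw [hFF, mem_dedupFold]
    rw [returnfactorslist_eq, returnfactorslist_eq, mem_erase_two n x hn]
    rw [hS, PySem.Set.mem_discard, PySem.Set.mem_union]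
    rw [mem_divisorsSet n x hn, mem_divisorsSet (n + 1) x (by omega)]
    rw [List.mem_append, mem_pvDivsFrom, mem_pvDivsFrom]
    simp
  have hperm : FF.Perm S := (List.perm_ext_iff_of_nodup hFFnodup hSnodup).2 hmem
  calc PySem.List.sorted FF (fun x => x) false
      = PySem.List.sorted S (fun x => x) false :=
        PySem.List.sorted_eq_sorted_of_perm FF S (fun x => x) (fun _ _ h => h) hperm
    _ = returntrianglefactors_alt n := rfl
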